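-- pv_equiv track=rewrite | github.com/yoonseocho/Algorithm | 프로그래머스/3/84021. 퍼즐 조각 채우기/퍼즐 조각 채우기.py | solution
-- ===== SOURCE A (Python) =====
-- from collections import deque
--
-- def solution(game_board, table):
--     n = len(game_board)
--
--     dxs = [-1, 1, 0, 0]
--     dys = [0, 0, -1, 1]
--
--     q = deque()
--
--     def in_range(x, y):
--         return 0<=x<n and 0<=y<n
--
--     def normalize(block):
--         min_x = min(x for x, y in block)
--         min_y = min(y for x, y in block)
--
--         normalized_block = []
--         for x, y in block:
--             normalized_block.append((x-min_x, y-min_y))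
--
--         return sorted(normalized_block)
--
--     def rotate(block):
--         return [(y, -x) for x, y in block]
--
--     def bfs(x, y, target_val, matrix, visited):
--         block = []
--         q.append((x, y))
--         visited[x][y] = True
--
--         while q:
--             x, y = q.popleft()
--             block.append((x, y))
--
--             for dx, dy in zip(dxs, dys):
--                 nx, ny = x + dx, y + dy
--                 if in_range(nx, ny) and not visited[nx][ny] and matrix[nx][ny] == target_val:
--                     visited[nx][ny] = True
--                     q.append((nx, ny))
--
--         return normalize(block)
--
--
--
--     # game_board에서 0인 부분 추출
--     visited_board = [[False] * n for _ in range(n)]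
--     board_pieces = []
--     for i in range(n):
--         for j in range(n):
--             if game_board[i][j] == 0 and not visited_board[i][j]:
--                 piece = bfs(i, j, 0, game_board, visited_board)
--                 board_pieces.append(piece)
--
--     # table에서 1인 부분 추출
--     visited_table = [[False] * n for _ in range(n)]
--     table_pieces = []
--     for i in range(n):
--         for j in range(n):
--             if table[i][j] == 1 and not visited_table[i][j]:
--                 piece = bfs(i, j, 1, table, visited_table)
--                 table_pieces.append(piece)
--
--     # game_board와 table 조각 비교
--     table_used = [False] * len(table_pieces)
--     answer = 0
--
--     for board_p in board_pieces:
--         found = False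
--         for i in range(len(table_pieces)):
--             if table_used[i] or found:
--                 continue
--
--             target_p = table_pieces[i]
--             for _ in range(4):
--                 if board_p == target_p:
--                     answer += len(board_p)
--                     table_used[i] = True
--                     found = True
--                     break
--
--                 target_p = rotate(target_p)
--                 target_p = normalize(target_p)
--             if found:
--                 break
--     return answer
-- ===== SOURCE B (Python) =====
-- from collections import Counter
--
-- def solution(game_board, table):
--     n = len(game_board)
--     coords = [(i, j) for i in range(n) for j in range(n)]
--
--     def norm(cells):
--         mx, my = cells[0]
--         for x, y in cells[1:]:
--             if x < mx:
--                 mx = x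
--             if y < my:
--                 my = y
--         return sorted((x - mx, y - my) for x, y in cells)
--
--     def canonical(cells):
--         # smallest of the four rotation-normal forms: one key per shape class
--         best = cur = norm(cells)
--         for _ in range(3):
--             cur = norm([(y, -x) for x, y in cur])
--             if cur < best:
--                 best = cur
--         return tuple(best)
--
--     def components(grid, val):
--         seen = set()
--         comps = []
--         for i, j in coords:
--             if grid[i][j] == val and (i, j) not in seen:
--                 comp = [(i, j)]
--                 seen.add((i, j))
--                 k = 0
--                 while k < len(comp):
--                     x, y = comp[k]
--                     k += 1
--                     for q in ((x - 1, y), (x + 1, y), (x, y - 1), (x, y + 1)):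
--                         if 0 <= q[0] < n and 0 <= q[1] < n and q not in seen and grid[q[0]][q[1]] == val:
--                             seen.add(q)
--                             comp.append(q)
--                 comps.append(comp)
--         return comps
--
--     counts = Counter(canonical(c) for c in components(table, 1))
--     answer = 0
--     for c in components(game_board, 0):
--         key = canonical(c)
--         if counts[key] > 0:
--             counts[key] -= 1
--             answer += len(c)
--     return answer
-- ===== Notes on version B (the rewrite author's own statement) =====
-- stated objective: alternative
-- what changed: B extracts pieces with a read-pointer flood fill over a flat coordinate list using a set of seen cells (no boolean matrix, no deque), and matches by a canonical rotation-minimal shape key counted once in a Counter, replacing A's nested scan that retries all four rotations of every unused table piece for every board piece; the matching pass drops from quadratic to linear in the number of pieces, but on random boards piece counts are small and a timing run found no measurable gain.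
import Mathlib
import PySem

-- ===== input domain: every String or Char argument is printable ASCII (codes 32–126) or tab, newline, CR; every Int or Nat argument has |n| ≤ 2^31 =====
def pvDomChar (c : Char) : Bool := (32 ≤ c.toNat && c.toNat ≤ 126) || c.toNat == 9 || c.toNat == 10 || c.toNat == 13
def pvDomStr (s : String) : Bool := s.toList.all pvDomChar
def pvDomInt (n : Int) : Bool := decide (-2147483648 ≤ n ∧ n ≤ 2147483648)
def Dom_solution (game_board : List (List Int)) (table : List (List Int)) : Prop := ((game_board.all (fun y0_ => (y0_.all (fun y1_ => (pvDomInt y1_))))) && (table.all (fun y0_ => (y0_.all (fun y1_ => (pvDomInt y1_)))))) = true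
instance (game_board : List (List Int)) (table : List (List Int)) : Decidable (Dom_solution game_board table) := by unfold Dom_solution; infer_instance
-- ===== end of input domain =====

-- B replaces A's quadratic rotation-matching by a canonical (min-over-4-rotations) shape key counted
-- once in a Counter, and extracts pieces with a seen-set flood fill over a flat coordinate list (alternative algorithm).


-- ===== PORT A =====
-- A-side helpers (grid access with PySem primitives; indices are guarded by in_range, defaults unreachable)
def pvInRangeA (n x y : Int) : Bool := decide (0 ≤ x ∧ x < n ∧ 0 ≤ y ∧ y < n)
def pvCellA (m : List (List Int)) (x y : Int) : Int := PySem.List.pyGetD (PySem.List.pyGetD m x []) y 0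
def pvVisA (v : List (List Bool)) (x y : Int) : Bool := PySem.List.pyGetD (PySem.List.pyGetD v x []) y false
def pvMarkA (v : List (List Bool)) (x y : Int) : List (List Bool) :=
  PySem.List.pySetD v x (PySem.List.pySetD (PySem.List.pyGetD v x []) y true)

def rotateA (block : List (Int × Int)) : List (Int × Int) := block.map (fun p => (p.2, -p.1))

def normalizeA (block : List (Int × Int)) : List (Int × Int) :=
  let minX := (PySem.List.min? (block.map Prod.fst) (fun v => v)).getD 0
  let minY := (PySem.List.min? (block.map Prod.snd) (fun v => v)).getD 0
  PySem.List.sorted2 (block.map (fun p => (p.1 - minX, p.2 - minY))) Prod.fst Prod.snd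

-- zip(dxs, dys) of A, and the neighbour scan of one popped cell
def pvDirsA : List (Int × Int) := [(-1, 0), (1, 0), (0, -1), (0, 1)]
def stepBodyA (n : Int) (matrix : List (List Int)) (target : Int) (x y : Int)
    (qv : List (Int × Int) × List (List Bool)) (d : Int × Int) :
    List (Int × Int) × List (List Bool) :=
  if pvInRangeA n (x + d.1) (y + d.2) = true ∧ pvVisA qv.2 (x + d.1) (y + d.2) = false ∧
      pvCellA matrix (x + d.1) (y + d.2) = target
  then (qv.1 ++ [(x + d.1, y + d.2)], pvMarkA qv.2 (x + d.1) (y + d.2))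
  else qv
def stepA (n : Int) (matrix : List (List Int)) (target : Int) (x y : Int)
    (qv : List (Int × Int) × List (List Bool)) : List (Int × Int) × List (List Bool) :=
  pvDirsA.foldl (stepBodyA n matrix target x y) qv

-- the while-q loop of bfs; fuel only makes it total (n*n+1 always suffices: every enqueue marks a
-- fresh cell first, so at most n*n cells are ever enqueued); the fuel-0 branch is unreachable
def bfsLoopA (n : Int) (matrix : List (List Int)) (target : Int) :
    Nat → List (Int × Int) → List (Int × Int) → List (List Bool) →
    List (Int × Int) × List (List Bool)
  | 0, queue, block, visited => (block ++ queue, visited)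
  | fuel + 1, queue, block, visited =>
    match queue with
    | [] => (block, visited)
    | (x, y) :: rest =>
      let r := stepA n matrix target x y (rest, visited)
      bfsLoopA n matrix target fuel r.1 (block ++ [(x, y)]) r.2

def bfsA (n : Int) (matrix : List (List Int)) (target : Int) (x y : Int)
    (visited : List (List Bool)) (fuel : Nat) : List (Int × Int) × List (List Bool) :=
  let r := bfsLoopA n matrix target fuel [(x, y)] [] (pvMarkA visited x y)
  (normalizeA r.1, r.2)

-- the two extraction scans of A (game_board/0 and table/1 are the same code)
def scanA (matrix : List (List Int)) (target : Int) (n : Nat) :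
    List (List (Int × Int)) × List (List Bool) :=
  (List.range n).foldl (fun st (i : Nat) =>
      (List.range n).foldl (fun (st : List (List (Int × Int)) × List (List Bool)) (j : Nat) =>
          if pvCellA matrix (i : Int) (j : Int) = target ∧ pvVisA st.2 (i : Int) (j : Int) = false then
            let r := bfsA (n : Int) matrix target (i : Int) (j : Int) st.2 (n * n + 1)
            (st.1 ++ [r.1], r.2)
          else st) st)
    ([], List.replicate n (List.replicate n false))

-- the 'for _ in range(4)' rotation loop (with its break flag)
def rotTryA (p t : List (Int × Int)) : Bool :=
  ((List.range 4).foldl (fun (tf : List (Int × Int) × Bool) _ =>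
      if tf.2 then tf
      else if p = tf.1 then (tf.1, true)
      else (normalizeA (rotateA tf.1), false)) (t, false)).2

-- the 'for i in range(len(table_pieces))' loop (state: used, answer, found)
def innerBodyA (tps : List (List (Int × Int))) (p : List (Int × Int))
    (st : List Bool × Int × Bool) (i : Nat) : List Bool × Int × Bool :=
  if st.1.getD i false = true ∨ st.2.2 = true then st
  else if rotTryA p (tps.getD i []) = true then (st.1.set i true, (st.2.1 + p.length, true))
  else st
def innerA (tps : List (List (Int × Int))) (p : List (Int × Int))
    (ua : List Bool × Int) : List Bool × Int :=
  let r := (List.range tps.length).foldl (innerBodyA tps p) (ua.1, ua.2, false)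
  (r.1, r.2.1)

def solution (game_board : List (List Int)) (table : List (List Int)) : Int :=
  let n := game_board.length
  let board_pieces := (scanA game_board 0 n).1
  let table_pieces := (scanA table 1 n).1
  (board_pieces.foldl (fun ua p => innerA table_pieces p ua)
    (List.replicate table_pieces.length false, 0)).2

-- ===== PORT B =====
-- B-side helpers
-- the flat coordinate list [(i, j) for i in range(n) for j in range(n)]
def coordsB (n : Nat) : List (Int × Int) :=
  (List.range n).flatMap (fun (i : Nat) => (List.range n).map (fun (j : Nat) => ((i : Int), (j : Int))))

-- norm: one loop tracking both minima, then sort by Python's tuple (lexicographic) order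
def normB (cells : List (Int × Int)) : List (Int × Int) :=
  match cells with
  | [] => []    -- unreachable guard: every extracted component is nonempty
  | c :: cs =>
    let m := cs.foldl (fun (m : Int × Int) p =>
      (if p.1 < m.1 then p.1 else m.1, if p.2 < m.2 then p.2 else m.2)) c
    PySem.List.sorted ((c :: cs).map (fun p => (p.1 - m.1, p.2 - m.2)))
      (fun p => (toLex p : Int ×ₗ Int))

-- Python's '<' on a tuple of (int, int) tuples is lexicographic: exactly the Lex order below
def pvLex (s : List (Int × Int)) : List (Int ×ₗ Int) := s.map (fun p => toLex p)
def lexLtB (s t : List (Int × Int)) : Bool := decide (pvLex s < pvLex t)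

-- running best over the three further rotations
def canonB (cells : List (Int × Int)) : List (Int × Int) :=
  ((List.range 3).foldl (fun (bc : List (Int × Int) × List (Int × Int)) _ =>
      let cur := normB (bc.2.map (fun p => (p.2, -p.1)))
      (if lexLtB cur bc.1 = true then cur else bc.1, cur))
    (normB cells, normB cells)).1

-- one neighbour visit: seen is a set of cells, comp grows at the back
def visitB (n : Int) (grid : List (List Int)) (v : Int)
    (cs : List (Int × Int) × List (Int × Int)) (q : Int × Int) :
    List (Int × Int) × List (Int × Int) :=
  if (0 ≤ q.1 ∧ q.1 < n ∧ 0 ≤ q.2 ∧ q.2 < n) ∧ PySem.Set.contains cs.2 q = false ∧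
      PySem.List.pyGetD (PySem.List.pyGetD grid q.1 []) q.2 0 = v
  then (cs.1 ++ [q], PySem.Set.add cs.2 q) else cs

-- 'while k < len(comp)' read-pointer loop; fuel only makes it total (n*n+1 suffices: every
-- appended cell is first added to seen); the fuel-0 branch is unreachable
def growB (n : Int) (grid : List (List Int)) (v : Int) :
    Nat → List (Int × Int) → Nat → List (Int × Int) → List (Int × Int) × List (Int × Int)
  | 0, comp, _, seen => (comp, seen)
  | fuel + 1, comp, k, seen =>
    match comp[k]? with
    | none => (comp, seen)
    | some c =>
      let r := [(c.1 - 1, c.2), (c.1 + 1, c.2), (c.1, c.2 - 1), (c.1, c.2 + 1)].foldl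
        (visitB n grid v) (comp, seen)
      growB n grid v fuel r.1 (k + 1) r.2

def componentsB (grid : List (List Int)) (v : Int) (n : Nat) :
    List (List (Int × Int)) × List (Int × Int) :=
  (coordsB n).foldl (fun (st : List (List (Int × Int)) × List (Int × Int)) ij =>
      if PySem.List.pyGetD (PySem.List.pyGetD grid ij.1 []) ij.2 0 = v ∧
          PySem.Set.contains st.2 ij = false then
        let r := growB (n : Int) grid v (n * n + 1) [ij] 0 (PySem.Set.add st.2 ij)
        (st.1 ++ [r.1], r.2)
      else st)
    ([], PySem.Set.empty)

def solution_alt (game_board : List (List Int)) (table : List (List Int)) : Int :=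
  let n := game_board.length
  let counts := PySem.Dict.counter ((componentsB table 1 n).1.map canonB)
  ((componentsB game_board 0 n).1.foldl
    (fun (ca : PySem.Dict (List (Int × Int)) Int × Int) c =>
      let key := canonB c
      if ca.1.getD key 0 > 0 then (ca.1.insert key (ca.1.getD key 0 - 1), ca.2 + (c.length : Int))
      else ca)
    (counts, 0)).2

-- ===== PRECONDITION & SPEC =====
-- Pre_ excludes exactly the inputs on which A raises IndexError: a game_board row shorter than
-- len(game_board), or table (resp. one of its first n rows) shorter than n = len(game_board).
def Pre_solution (game_board : List (List Int)) (table : List (List Int)) : Prop :=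
  (∀ r ∈ game_board, game_board.length ≤ r.length) ∧
  game_board.length ≤ table.length ∧
  (∀ r ∈ table.take game_board.length, game_board.length ≤ r.length)
instance (game_board : List (List Int)) (table : List (List Int)) :
    Decidable (Pre_solution game_board table) := by unfold Pre_solution; infer_instance
def pvWitness_solution : List (List Int) × List (List Int) := ([[0]], [[1]])

def Spec_solution (game_board : List (List Int)) (table : List (List Int)) (out : Int) : Prop :=
  out = solution_alt game_board table
instance (game_board : List (List Int)) (table : List (List Int)) (out : Int) :
    Decidable (Spec_solution game_board table out) := by unfold Spec_solution; infer_instance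

-- ===== CLAIM (what is proved, stated in full; the proofs are below) =====
def Claim_equal_solution : Prop := ∀ (game_board : List (List Int)) (table : List (List Int)), Dom_solution game_board table → Pre_solution game_board table → Spec_solution game_board table (solution game_board table)

-- ===== LEMMAS AND PROOFS =====

-- generic fold correspondence
theorem pvFoldRel {α β γ : Type} (R : α → β → Prop) (f : α → γ → α) (g : β → γ → β)
    (l : List γ) (a : α) (b : β) (hab : R a b)
    (hstep : ∀ x a b, R a b → R (f a x) (g b x)) : R (l.foldl f a) (l.foldl g b) := by
  induction l generalizing a b with
  | nil => exact hab
  | cons x xs ih => exact ih _ _ (hstep x a b hab)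


theorem pvFoldRelMem {α β γ : Type} (R : α → β → Prop) (f : α → γ → α) (g : β → γ → β) :
    ∀ (l : List γ) (a : α) (b : β), R a b →
    (∀ x ∈ l, ∀ a b, R a b → R (f a x) (g b x)) → R (l.foldl f a) (l.foldl g b) := by
  intro l
  induction l with
  | nil => intro a b hab _; exact hab
  | cons x xs ih =>
    intro a b hab hstep
    exact ih _ _ (hstep x (List.mem_cons_self ..) a b hab)
      (fun z hz => hstep z (List.mem_cons_of_mem x hz))

-- Phase 1: extraction equality up to the visited representation ---------------

theorem pvGetD_default_or_mem {α : Type} (l : List α) (i : Int) (d : α) :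
    PySem.List.pyGetD l i d = d ∨ PySem.List.pyGetD l i d ∈ l := by
  by_cases h : PySem.Raise.InRange l.length i
  · exact Or.inr (PySem.List.pyGetD_mem l d h)
  · exact Or.inl (PySem.List.pyGetD_of_none l i d ((PySem.List.pyGet?_eq_none_iff l i).2 h))

-- visited matrix shape (n rows of n cells) and its relation to B's seen set
def pvGrid (n : Nat) (v : List (List Bool)) : Prop :=
  v.length = n ∧ ∀ r ∈ v, r.length = n
def pvRel (n : Nat) (v : List (List Bool)) (s : List (Int × Int)) : Prop :=
  pvGrid n v ∧ ∀ x y : Int, 0 ≤ x → x < n → 0 ≤ y → y < n →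
    (pvVisA v x y = true ↔ (x, y) ∈ s)

theorem pvVisA_false {v : List (List Bool)}
    (hv : ∀ r ∈ v, ∀ b ∈ r, b = false) (x y : Int) : pvVisA v x y = false := by
  unfold pvVisA
  rcases pvGetD_default_or_mem (PySem.List.pyGetD v x []) y false with h2 | h2
  · exact h2
  · rcases pvGetD_default_or_mem v x ([] : List Bool) with h1 | h1
    · rw [h1] at h2; simp at h2
    · exact hv _ h1 _ h2

theorem pvRel_init (n : Nat) :
    pvRel n (List.replicate n (List.replicate n false)) PySem.Set.empty := by
  refine ⟨⟨by simp, fun r hr => by simp [List.eq_of_mem_replicate hr]⟩, ?_⟩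
  intro x y _ _ _ _
  rw [pvVisA_false (fun r hr b hb => by
    rw [List.eq_of_mem_replicate hr] at hb; exact List.eq_of_mem_replicate hb)]
  constructor
  · intro h; exact absurd h (by simp)
  · intro h; exact absurd h (by simp [PySem.Set.empty])

theorem pvVisA_nat (v : List (List Bool)) (ka kb : Nat) :
    pvVisA v (ka : Int) (kb : Int) = (v.getD ka []).getD kb false := by
  unfold pvVisA
  rw [PySem.List.pyGetD_natCast, PySem.List.pyGetD_natCast]

theorem pvMarkA_nat (v : List (List Bool)) (kx ky : Nat) :
    pvMarkA v (kx : Int) (ky : Int) = v.set kx ((v.getD kx []).set ky true) := by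
  unfold pvMarkA
  rw [PySem.List.pyGetD_natCast, PySem.List.pySetD_natCast, PySem.List.pySetD_natCast]

theorem pvRel_mark {n : Nat} {v : List (List Bool)} {s : List (Int × Int)}
    (h : pvRel n v s) {x y : Int} (hx0 : 0 ≤ x) (hxn : x < (n : Int)) (hy0 : 0 ≤ y)
    (hyn : y < (n : Int)) :
    pvRel n (pvMarkA v x y) (PySem.Set.add s (x, y)) := by
  obtain ⟨⟨hlen, hrows⟩, hvis⟩ := h
  obtain ⟨kx, rfl⟩ := Int.eq_ofNat_of_zero_le hx0
  obtain ⟨ky, rfl⟩ := Int.eq_ofNat_of_zero_le hy0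
  have hkx : kx < n := by exact_mod_cast hxn
  have hky : ky < n := by exact_mod_cast hyn
  have hkxv : kx < v.length := by omega
  have hrowget : v.getD kx [] = v[kx] := List.getD_eq_getElem v [] hkxv
  have hrowlen : (v.getD kx []).length = n := by
    rw [hrowget]; exact hrows _ (List.getElem_mem _)
  rw [pvMarkA_nat]
  refine ⟨⟨by simp [hlen], ?_⟩, ?_⟩
  · intro r hr
    rcases List.mem_or_eq_of_mem_set hr with h1 | h1
    · exact hrows r h1
    · rw [h1, List.length_set]; exact hrowlen
  · intro a b ha0 han hb0 hbn
    obtain ⟨ka, rfl⟩ := Int.eq_ofNat_of_zero_le ha0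
    obtain ⟨kb, rfl⟩ := Int.eq_ofNat_of_zero_le hb0
    have hka : ka < n := by exact_mod_cast han
    have hkb : kb < n := by exact_mod_cast hbn
    have hkav : ka < v.length := by omega
    rw [pvVisA_nat, PySem.Set.mem_add]
    have hgset : (v.set kx ((v.getD kx []).set ky true)).getD ka [] =
        if kx = ka then (v.getD kx []).set ky true else v.getD ka [] := by
      rw [List.getD_eq_getElem _ _ (by simpa using hkav), List.getElem_set]
      split_ifs with hh
      · rfl
      · exact (List.getD_eq_getElem v [] hkav).symm
    rw [hgset]
    by_cases hxa : kx = ka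
    · subst hxa
      rw [if_pos rfl]
      have hinner : ((v.getD kx []).set ky true).getD kb false =
          if ky = kb then true else (v.getD kx []).getD kb false := by
        rw [List.getD_eq_getElem _ _ (by rw [List.length_set]; omega), List.getElem_set]
        split_ifs with hh
        · rfl
        · exact (List.getD_eq_getElem _ _ (by omega)).symm
      rw [hinner]
      by_cases hyb : ky = kb
      · subst hyb; simp
      · rw [if_neg hyb, ← pvVisA_nat]
        have hvv := hvis (kx : Int) (kb : Int) (by positivity) (by exact_mod_cast hkx)
          (by positivity) (by exact_mod_cast hkb)
        have hpair : ¬(((kx : Int), (kb : Int)) = ((kx : Int), (ky : Int))) := by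
          simp; omega
        constructor
        · intro hh; exact Or.inl (hvv.1 hh)
        · rintro (hh | hh)
          · exact hvv.2 hh
          · exact absurd hh hpair
    · rw [if_neg hxa, ← pvVisA_nat]
      have hvv := hvis (ka : Int) (kb : Int) (by positivity) (by exact_mod_cast hka)
        (by positivity) (by exact_mod_cast hkb)
      have hpair : ¬(((ka : Int), (kb : Int)) = ((kx : Int), (ky : Int))) := by
        simp; omega
      constructor
      · intro hh; exact Or.inl (hvv.1 hh)
      · rintro (hh | hh)
        · exact hvv.2 hh
        · exact absurd hh hpair

theorem pvContains_false_iff (s : List (Int × Int)) (q : Int × Int) :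
    PySem.Set.contains s q = false ↔ ¬ q ∈ s := by
  rw [← PySem.Set.contains_iff]
  cases PySem.Set.contains s q <;> simp

-- A's neighbour scan as a fold over explicit coordinates
def stepCoordA (n : Int) (grid : List (List Int)) (t : Int)
    (qv : List (Int × Int) × List (List Bool)) (p : Int × Int) :
    List (Int × Int) × List (List Bool) :=
  if pvInRangeA n p.1 p.2 = true ∧ pvVisA qv.2 p.1 p.2 = false ∧ pvCellA grid p.1 p.2 = t
  then (qv.1 ++ [p], pvMarkA qv.2 p.1 p.2) else qv

theorem stepA_eq_coords (n : Int) (grid : List (List Int)) (t x y : Int)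
    (qv : List (Int × Int) × List (List Bool)) :
    stepA n grid t x y qv =
      [(x - 1, y), (x + 1, y), (x, y - 1), (x, y + 1)].foldl (stepCoordA n grid t) qv := by
  simp [stepA, pvDirsA, stepBodyA, stepCoordA, sub_eq_add_neg]

theorem visit_corr (n : Nat) (grid : List (List Int)) (t : Int) :
    ∀ (L : List (Int × Int)) (pref qa : List (Int × Int)) (v : List (List Bool))
      (s : List (Int × Int)), pvRel n v s →
    (L.foldl (visitB (n : Int) grid t) (pref ++ qa, s)).1 =
      pref ++ (L.foldl (stepCoordA (n : Int) grid t) (qa, v)).1 ∧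
    pvRel n (L.foldl (stepCoordA (n : Int) grid t) (qa, v)).2
      (L.foldl (visitB (n : Int) grid t) (pref ++ qa, s)).2 := by
  intro L
  induction L with
  | nil => intro pref qa v s h; exact ⟨rfl, h⟩
  | cons p ps ih =>
    intro pref qa v s h
    simp only [List.foldl_cons]
    by_cases hc : (0 ≤ p.1 ∧ p.1 < (n : Int) ∧ 0 ≤ p.2 ∧ p.2 < (n : Int)) ∧
        PySem.Set.contains s p = false ∧
        PySem.List.pyGetD (PySem.List.pyGetD grid p.1 []) p.2 0 = t
    · obtain ⟨hr, hseen, hcell⟩ := hc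
      have hvv := h.2 p.1 p.2 hr.1 hr.2.1 hr.2.2.1 hr.2.2.2
      have hcA : pvInRangeA (n : Int) p.1 p.2 = true ∧ pvVisA v p.1 p.2 = false ∧
          pvCellA grid p.1 p.2 = t := by
        refine ⟨by simpa [pvInRangeA] using hr, ?_, hcell⟩
        have hnm : ¬ p ∈ s := (pvContains_false_iff s p).1 hseen
        cases hvp : pvVisA v p.1 p.2
        · rfl
        · exact absurd (hvv.1 hvp) (by simpa using hnm)
      rw [visitB, if_pos ⟨hr, hseen, hcell⟩, stepCoordA, if_pos hcA]
      have hrel : pvRel n (pvMarkA v p.1 p.2) (PySem.Set.add s p) := by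
        have := pvRel_mark h hr.1 hr.2.1 hr.2.2.1 hr.2.2.2
        simpa using this
      have := ih pref (qa ++ [p]) (pvMarkA v p.1 p.2) (PySem.Set.add s p) hrel
      simpa [List.append_assoc] using this
    · have hcA : ¬(pvInRangeA (n : Int) p.1 p.2 = true ∧ pvVisA v p.1 p.2 = false ∧
          pvCellA grid p.1 p.2 = t) := by
        intro hA
        apply hc
        obtain ⟨hr', hnv, hcell⟩ := hA
        have hr : 0 ≤ p.1 ∧ p.1 < (n : Int) ∧ 0 ≤ p.2 ∧ p.2 < (n : Int) := by
          simpa [pvInRangeA] using hr'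
        refine ⟨hr, ?_, hcell⟩
        rw [pvContains_false_iff]
        intro hmem
        have hvv := h.2 p.1 p.2 hr.1 hr.2.1 hr.2.2.1 hr.2.2.2
        rw [hvv.2 (by simpa using hmem)] at hnv
        simp at hnv
      rw [visitB, if_neg hc, stepCoordA, if_neg hcA]
      exact ih pref qa v s h

theorem grow_corr (n : Nat) (grid : List (List Int)) (t : Int) :
    ∀ (fuel : Nat) (queue block : List (Int × Int)) (v : List (List Bool))
      (s : List (Int × Int)), pvRel n v s →
    (growB (n : Int) grid t fuel (block ++ queue) block.length s).1 =
      (bfsLoopA (n : Int) grid t fuel queue block v).1 ∧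
    pvRel n (bfsLoopA (n : Int) grid t fuel queue block v).2
      (growB (n : Int) grid t fuel (block ++ queue) block.length s).2 := by
  intro fuel
  induction fuel with
  | zero => intro queue block v s h; exact ⟨rfl, h⟩
  | succ fuel ih =>
    intro queue block v s h
    cases queue with
    | nil =>
      simp only [bfsLoopA, growB, List.append_nil]
      rw [show (block)[block.length]? = none from by simp]
      exact ⟨rfl, h⟩
    | cons c rest =>
      obtain ⟨x, y⟩ := c
      have hget : (block ++ (x, y) :: rest)[block.length]? = some (x, y) := by
        rw [List.getElem?_append_right (Nat.le_refl _)]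
        simp
      simp only [bfsLoopA, growB, hget]
      rw [stepA_eq_coords,
        show block ++ (x, y) :: rest = (block ++ [(x, y)]) ++ rest from by simp]
      obtain ⟨hq, hrel⟩ := visit_corr n grid t [(x - 1, y), (x + 1, y), (x, y - 1), (x, y + 1)]
        (block ++ [(x, y)]) rest v s h
      have hlen : block.length + 1 = (block ++ [(x, y)]).length := by simp
      rw [hq, hlen]
      exact ih _ _ _ _ hrel

theorem foldl_flatMap' {α β γ : Type} (g : β → List γ) (f : α → γ → α) :
    ∀ (L : List β) (init : α),
      (L.flatMap g).foldl f init = L.foldl (fun a i => (g i).foldl f a) init := by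
  intro L
  induction L with
  | nil => intro init; rfl
  | cons x xs ih =>
    intro init
    rw [List.flatMap_cons, List.foldl_append, List.foldl_cons, ih]

theorem scanA_eq_componentsB (m : List (List Int)) (t : Int) (n : Nat) :
    (scanA m t n).1 = (componentsB m t n).1.map normalizeA ∧
    pvRel n (scanA m t n).2 (componentsB m t n).2 := by
  unfold scanA componentsB coordsB
  rw [foldl_flatMap']
  simp only [List.foldl_map]
  refine pvFoldRelMem
    (fun (a : List (List (Int × Int)) × List (List Bool))
         (b : List (List (Int × Int)) × List (Int × Int)) =>
      a.1 = b.1.map normalizeA ∧ pvRel n a.2 b.2) _ _ (List.range n)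
    ([], List.replicate n (List.replicate n false)) ([], PySem.Set.empty)
    ⟨rfl, pvRel_init n⟩ ?_
  intro i hi a b hab
  refine pvFoldRelMem
    (fun (a : List (List (Int × Int)) × List (List Bool))
         (b : List (List (Int × Int)) × List (Int × Int)) =>
      a.1 = b.1.map normalizeA ∧ pvRel n a.2 b.2) _ _ (List.range n) _ _ hab ?_
  intro j hj a b hab
  obtain ⟨hpieces, hrel⟩ := hab
  rw [List.mem_range] at hi hj
  have hi0 : (0 : Int) ≤ (i : Int) := by positivity
  have hin : (i : Int) < (n : Int) := by exact_mod_cast hi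
  have hj0 : (0 : Int) ≤ (j : Int) := by positivity
  have hjn : (j : Int) < (n : Int) := by exact_mod_cast hj
  have hvv := hrel.2 (i : Int) (j : Int) hi0 hin hj0 hjn
  by_cases hc : pvCellA m (i : Int) (j : Int) = t ∧ PySem.Set.contains b.2 ((i : Int), (j : Int)) = false
  · have hcA : pvCellA m (i : Int) (j : Int) = t ∧ pvVisA a.2 (i : Int) (j : Int) = false := by
      refine ⟨hc.1, ?_⟩
      cases hvp : pvVisA a.2 (i : Int) (j : Int)
      · rfl
      · exact absurd (hvv.1 hvp) (by simpa using (pvContains_false_iff _ _).1 hc.2)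
    have hcB : PySem.List.pyGetD (PySem.List.pyGetD m (i : Int) []) (j : Int) 0 = t ∧
        PySem.Set.contains b.2 ((i : Int), (j : Int)) = false := hc
    rw [if_pos hcA, if_pos hcB]
    have hrelm : pvRel n (pvMarkA a.2 (i : Int) (j : Int))
        (PySem.Set.add b.2 ((i : Int), (j : Int))) :=
      pvRel_mark hrel hi0 hin hj0 hjn
    obtain ⟨hq, hr⟩ := grow_corr n m t (n * n + 1) [((i : Int), (j : Int))] []
      (pvMarkA a.2 (i : Int) (j : Int)) (PySem.Set.add b.2 ((i : Int), (j : Int))) hrelm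
    simp only [List.nil_append, List.length_nil] at hq hr
    constructor
    · show a.1 ++ [(bfsA (n : Int) m t (i : Int) (j : Int) a.2 (n * n + 1)).1] = _
      rw [hpieces, bfsA]
      simp [hq]
    · show pvRel n (bfsA (n : Int) m t (i : Int) (j : Int) a.2 (n * n + 1)).2 _
      exact hr
  · have hcA : ¬(pvCellA m (i : Int) (j : Int) = t ∧ pvVisA a.2 (i : Int) (j : Int) = false) := by
      intro hA
      apply hc
      refine ⟨hA.1, (pvContains_false_iff _ _).2 ?_⟩
      intro hmem
      rw [hvv.2 hmem] at hA
      simp at hA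
    have hcB : ¬(PySem.List.pyGetD (PySem.List.pyGetD m (i : Int) []) (j : Int) 0 = t ∧
        PySem.Set.contains b.2 ((i : Int), (j : Int)) = false) := hc
    rw [if_neg hcA, if_neg hcB]
    exact ⟨hpieces, hrel⟩

-- Phase 2: shape algebra ------------------------------------------------------

theorem pvLex_inj : Function.Injective pvLex :=
  List.map_injective_iff.2 (fun a b h => by simpa using congrArg ofLex h)

theorem pvToLex_inj : Function.Injective (fun p : Int × Int => (toLex p : Int ×ₗ Int)) :=
  fun a b h => by simpa using congrArg ofLex h

-- Python's tuple sort (sorted2 fst snd) is the sort by the injective Lex key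
theorem sorted2_eq_sorted_lex (xs : List (Int × Int)) :
    PySem.List.sorted2 xs Prod.fst Prod.snd =
      PySem.List.sorted xs (fun p => (toLex p : Int ×ₗ Int)) := by
  have hfun : (fun (a b : Int × Int) =>
        (decide (a.1 < b.1) || (!decide (b.1 < a.1) && decide (a.2 < b.2)))) =
      (fun (a b : Int × Int) => decide ((toLex a : Int ×ₗ Int) < toLex b)) := by
    funext a b
    rcases lt_trichotomy a.1 b.1 with h | h | h
    · simp [Prod.Lex.lt_iff, h, asymm h]
    · simp [Prod.Lex.lt_iff, h]
    · simp [Prod.Lex.lt_iff, asymm h, h, ne_of_gt h]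
  simp only [PySem.List.sorted2, PySem.List.sorted, if_neg (by decide : ¬(false = true))]
  rw [hfun]

theorem min?_id_spec {l : List Int} {m : Int} (h : PySem.List.min? l (fun v => v) = some m) :
    m ∈ l ∧ ∀ y ∈ l, m ≤ y :=
  ⟨PySem.List.min?_mem h, fun y hy => PySem.List.min?_isMin h y hy⟩

theorem min?_id_perm {l l' : List Int} (h : l.Perm l') :
    PySem.List.min? l (fun v => v) = PySem.List.min? l' (fun v => v) := by
  cases hl : PySem.List.min? l (fun v => v) with
  | none =>
    have hln : l = [] := (PySem.List.min?_eq_none_iff _ _).1 hl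
    subst hln
    have : l' = [] := h.nil_eq.symm
    subst this
    rfl
  | some m =>
    cases hl' : PySem.List.min? l' (fun v => v) with
    | none =>
      have hl'n : l' = [] := (PySem.List.min?_eq_none_iff _ _).1 hl'
      subst hl'n
      have : l = [] := h.symm.nil_eq.symm
      subst this
      simp [PySem.List.min?] at hl
    | some m' =>
      obtain ⟨hm, hmin⟩ := min?_id_spec hl
      obtain ⟨hm', hmin'⟩ := min?_id_spec hl'
      have h1 : m ≤ m' := hmin m' (h.symm.subset hm')
      have h2 : m' ≤ m := hmin' m (h.subset hm)
      rw [le_antisymm h1 h2]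

theorem min?_id_map_add (l : List Int) (a : Int) :
    PySem.List.min? (l.map (fun v => a + v)) (fun v => v) =
      (PySem.List.min? l (fun v => v)).map (fun v => a + v) := by
  cases hl : PySem.List.min? l (fun v => v) with
  | none =>
    have : l = [] := (PySem.List.min?_eq_none_iff _ _).1 hl
    subst this; simp [PySem.List.min?]
  | some m =>
    obtain ⟨hm, hmin⟩ := min?_id_spec hl
    cases hl' : PySem.List.min? (l.map (fun v => a + v)) (fun v => v) with
    | none =>
      rw [PySem.List.min?_eq_none_iff] at hl'
      simp at hl'
      subst hl'; simp at hm
    | some m' =>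
      obtain ⟨hm', hmin'⟩ := min?_id_spec hl'
      simp only [List.mem_map] at hm'
      obtain ⟨u, hu, hum⟩ := hm'
      have h1 : m' ≤ a + m := hmin' (a + m) (List.mem_map_of_mem hm)
      have h2 : a + m ≤ m' := by
        have := hmin u hu
        omega
      simp [le_antisymm h1 h2]

theorem normalizeA_perm {b b' : List (Int × Int)} (h : b.Perm b') :
    normalizeA b = normalizeA b' := by
  unfold normalizeA
  rw [min?_id_perm (h.map Prod.fst), min?_id_perm (h.map Prod.snd)]
  rw [sorted2_eq_sorted_lex, sorted2_eq_sorted_lex]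
  exact PySem.List.sorted_eq_sorted_of_perm _ _ _ pvToLex_inj (h.map _)

theorem normalizeA_shift (b : List (Int × Int)) (a c : Int) :
    normalizeA (b.map (fun p => (p.1 + a, p.2 + c))) = normalizeA b := by
  rcases hb : b with _ | ⟨hd, tl⟩
  · rfl
  rw [← hb]
  have hne : b ≠ [] := by rw [hb]; simp
  unfold normalizeA
  have h1 : (b.map (fun p : Int × Int => (p.1 + a, p.2 + c))).map Prod.fst =
      (b.map Prod.fst).map (fun v => a + v) := by
    simp only [List.map_map]
    exact List.map_congr_left (fun p _ => add_comm p.1 a)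
  have h2 : (b.map (fun p : Int × Int => (p.1 + a, p.2 + c))).map Prod.snd =
      (b.map Prod.snd).map (fun v => c + v) := by
    simp only [List.map_map]
    exact List.map_congr_left (fun p _ => add_comm p.2 c)
  rw [h1, h2, min?_id_map_add, min?_id_map_add]
  obtain ⟨mx, hmx⟩ : ∃ mx, PySem.List.min? (b.map Prod.fst) (fun v => v) = some mx := by
    cases h : PySem.List.min? (b.map Prod.fst) (fun v => v) with
    | none => exact absurd (by simpa using (PySem.List.min?_eq_none_iff _ _).1 h) hne
    | some m => exact ⟨m, rfl⟩
  obtain ⟨my, hmy⟩ : ∃ my, PySem.List.min? (b.map Prod.snd) (fun v => v) = some my := by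
    cases h : PySem.List.min? (b.map Prod.snd) (fun v => v) with
    | none => exact absurd (by simpa using (PySem.List.min?_eq_none_iff _ _).1 h) hne
    | some m => exact ⟨m, rfl⟩
  rw [hmx, hmy]
  simp only [Option.map_some, Option.getD_some, List.map_map]
  congr 1
  exact List.map_congr_left (fun p _ => congrArg₂ Prod.mk (by ring) (by ring))

theorem normalizeA_self_perm (b : List (Int × Int)) :
    ∃ a c : Int, (normalizeA b).Perm (b.map (fun p => (p.1 + a, p.2 + c))) := by
  refine ⟨-((PySem.List.min? (b.map Prod.fst) (fun v => v)).getD 0),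
    -((PySem.List.min? (b.map Prod.snd) (fun v => v)).getD 0), ?_⟩
  unfold normalizeA
  rw [sorted2_eq_sorted_lex]
  have hp := PySem.List.sorted_perm
    (b.map (fun p : Int × Int =>
      (p.1 - ((PySem.List.min? (b.map Prod.fst) (fun v => v)).getD 0),
       p.2 - ((PySem.List.min? (b.map Prod.snd) (fun v => v)).getD 0))))
    (fun p => (toLex p : Int ×ₗ Int)) false
  refine hp.trans (List.Perm.of_eq ?_)
  exact List.map_congr_left (fun p _ => congrArg₂ Prod.mk (by ring) (by ring))

theorem normalizeA_length (b : List (Int × Int)) : (normalizeA b).length = b.length := by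
  unfold normalizeA
  rw [sorted2_eq_sorted_lex]
  rw [(PySem.List.sorted_perm _ _ _).length_eq, List.length_map]

-- one rotation step on normalized shapes
def pvR (s : List (Int × Int)) : List (Int × Int) := normalizeA (rotateA s)

theorem rotateA_perm {b b' : List (Int × Int)} (h : b.Perm b') : (rotateA b).Perm (rotateA b') :=
  h.map _

theorem rotateA_shift (b : List (Int × Int)) (a c : Int) :
    rotateA (b.map (fun p => (p.1 + a, p.2 + c))) =
      (rotateA b).map (fun p => (p.1 + c, p.2 + (-a))) := by
  simp only [rotateA, List.map_map]
  exact List.map_congr_left (fun p _ => congrArg₂ Prod.mk (by ring) (by ring))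

theorem pvR_norm (b : List (Int × Int)) : pvR (normalizeA b) = normalizeA (rotateA b) := by
  obtain ⟨a, c, hp⟩ := normalizeA_self_perm b
  unfold pvR
  rw [normalizeA_perm (rotateA_perm hp), rotateA_shift, normalizeA_shift]

def pvRpow : Nat → List (Int × Int) → List (Int × Int)
  | 0, s => s
  | k + 1, s => pvR (pvRpow k s)

theorem pvRpow_norm (k : Nat) (b : List (Int × Int)) :
    pvRpow k (normalizeA b) = normalizeA (rotateA^[k] b) := by
  induction k generalizing b with
  | zero => rfl
  | succ k ih =>
    show pvR (pvRpow k (normalizeA b)) = _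
    rw [ih, pvR_norm, Function.iterate_succ_apply']

theorem rotateA_four (b : List (Int × Int)) : rotateA (rotateA (rotateA (rotateA b))) = b := by
  simp only [rotateA, List.map_map]
  have : ((fun p : Int × Int => (p.2, -p.1)) ∘ (fun p : Int × Int => (p.2, -p.1)) ∘
      (fun p : Int × Int => (p.2, -p.1)) ∘ (fun p : Int × Int => (p.2, -p.1))) = id := by
    funext p
    simp [Function.comp_apply]
  rw [this, List.map_id]

theorem pvR4 (b : List (Int × Int)) : pvRpow 4 (normalizeA b) = normalizeA b := by
  rw [pvRpow_norm]
  have : rotateA^[4] b = rotateA (rotateA (rotateA (rotateA b))) := by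
    simp [Function.iterate_succ_apply']
  rw [this, rotateA_four]

theorem pvRpow_add (a b : Nat) (s : List (Int × Int)) :
    pvRpow (a + b) s = pvRpow a (pvRpow b s) := by
  induction a with
  | zero => simp [pvRpow]
  | succ a ih =>
    rw [show a + 1 + b = (a + b) + 1 by omega]
    show pvR (pvRpow (a + b) s) = pvRpow (a + 1) (pvRpow b s)
    rw [ih]
    rfl

theorem pvRpow_mod (k : Nat) (t : List (Int × Int)) :
    pvRpow k (normalizeA t) = pvRpow (k % 4) (normalizeA t) := by
  induction k using Nat.strong_induction_on with
  | _ k ih =>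
    by_cases hk : k < 4
    · rw [Nat.mod_eq_of_lt hk]
    · have h4 : k = (k - 4) + 4 := by omega
      rw [h4, pvRpow_add, pvR4, ih (k - 4) (by omega)]
      congr 1
      omega

-- Phase 3: canonical key ------------------------------------------------------

def pvLmin (m s : List (Int × Int)) : List (Int × Int) := if lexLtB s m = true then s else m
def pvM (a b c d : List (Int × Int)) : List (Int × Int) := pvLmin (pvLmin (pvLmin a b) c) d

-- B's one-loop minimum pair is (min of the fsts, min of the snds)
theorem foldl_minpair (cs : List (Int × Int)) (c : Int × Int) :
    cs.foldl (fun (m : Int × Int) p =>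
      (if p.1 < m.1 then p.1 else m.1, if p.2 < m.2 then p.2 else m.2)) c =
    ((cs.map Prod.fst).foldl min c.1, (cs.map Prod.snd).foldl min c.2) := by
  have hmin : ∀ a b : Int, (if b < a then b else a) = min a b := by
    intro a b
    by_cases h : b < a
    · rw [if_pos h, min_eq_right h.le]
    · rw [if_neg h, min_eq_left (not_lt.1 h)]
  induction cs generalizing c with
  | nil => rfl
  | cons p ps ih =>
    rw [List.foldl_cons, ih, List.map_cons, List.map_cons, List.foldl_cons, List.foldl_cons,
      hmin c.1 p.1, hmin c.2 p.2]

theorem normB_eq (cells : List (Int × Int)) : normB cells = normalizeA cells := by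
  cases cells with
  | nil =>
    show ([] : List (Int × Int)) = normalizeA []
    simp [normalizeA, PySem.List.sorted2]
  | cons c cs =>
    show (let m := cs.foldl (fun (m : Int × Int) p =>
        (if p.1 < m.1 then p.1 else m.1, if p.2 < m.2 then p.2 else m.2)) c
      PySem.List.sorted ((c :: cs).map (fun p => (p.1 - m.1, p.2 - m.2)))
        (fun p => (toLex p : Int ×ₗ Int))) = normalizeA (c :: cs)
    rw [foldl_minpair]
    unfold normalizeA
    rw [show (c :: cs).map Prod.fst = c.1 :: cs.map Prod.fst from rfl,
      show (c :: cs).map Prod.snd = c.2 :: cs.map Prod.snd from rfl,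
      PySem.List.min?_id_cons, PySem.List.min?_id_cons]
    simp only [Option.getD_some]
    rw [sorted2_eq_sorted_lex]

theorem canonB_eq (blk : List (Int × Int)) :
    canonB blk = pvM (normalizeA blk) (pvRpow 1 (normalizeA blk))
      (pvRpow 2 (normalizeA blk)) (pvRpow 3 (normalizeA blk)) := by
  have h3 : List.range 3 = [0, 1, 2] := rfl
  simp only [canonB, h3, List.foldl_cons, List.foldl_nil, normB_eq]
  rfl

theorem pvLex_pvLmin (a b : List (Int × Int)) :
    pvLex (pvLmin a b) = min (pvLex a) (pvLex b) := by
  unfold pvLmin lexLtB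
  simp only [decide_eq_true_eq]
  split_ifs with h
  · exact (min_eq_right (le_of_lt h)).symm
  · exact (min_eq_left (not_lt.1 h)).symm

theorem pvLmin_comm (a b : List (Int × Int)) : pvLmin a b = pvLmin b a :=
  pvLex_inj (by rw [pvLex_pvLmin, pvLex_pvLmin, min_comm])

theorem pvLmin_assoc (a b c : List (Int × Int)) :
    pvLmin (pvLmin a b) c = pvLmin a (pvLmin b c) :=
  pvLex_inj (by rw [pvLex_pvLmin, pvLex_pvLmin, pvLex_pvLmin, pvLex_pvLmin, min_assoc])

theorem pvM_rot (a b c d : List (Int × Int)) : pvM a b c d = pvM b c d a := by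
  unfold pvM
  rw [pvLmin_assoc a b c, pvLmin_assoc a (pvLmin b c) d, pvLmin_comm a (pvLmin (pvLmin b c) d)]

theorem pvM_mem (a b c d : List (Int × Int)) :
    pvM a b c d = a ∨ pvM a b c d = b ∨ pvM a b c d = c ∨ pvM a b c d = d := by
  unfold pvM pvLmin
  split_ifs <;> simp

def pvCanonN (s : List (Int × Int)) : List (Int × Int) :=
  pvM s (pvRpow 1 s) (pvRpow 2 s) (pvRpow 3 s)

theorem canonB_eq_canonN (blk : List (Int × Int)) :
    canonB blk = pvCanonN (normalizeA blk) := canonB_eq blk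

theorem pvRpow_succ_inner (k : Nat) (s : List (Int × Int)) :
    pvRpow k (pvR s) = pvRpow (k + 1) s := by
  induction k with
  | zero => rfl
  | succ k ih => show pvR (pvRpow k (pvR s)) = pvR (pvRpow (k + 1) s); rw [ih]

theorem pvCanonN_R (b : List (Int × Int)) :
    pvCanonN (pvR (normalizeA b)) = pvCanonN (normalizeA b) := by
  unfold pvCanonN
  rw [pvRpow_succ_inner, pvRpow_succ_inner, pvRpow_succ_inner]
  show pvM (pvRpow 1 _) (pvRpow 2 _) (pvRpow 3 _) (pvRpow 4 _) = _
  rw [pvR4]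
  exact (pvM_rot (normalizeA b) (pvRpow 1 (normalizeA b)) (pvRpow 2 (normalizeA b))
    (pvRpow 3 (normalizeA b))).symm

theorem pvCanonN_Rpow (k : Nat) (b : List (Int × Int)) :
    pvCanonN (pvRpow k (normalizeA b)) = pvCanonN (normalizeA b) := by
  induction k with
  | zero => rfl
  | succ k ih =>
    have h : pvRpow (k + 1) (normalizeA b) = pvR (normalizeA (rotateA^[k] b)) := by
      show pvR (pvRpow k (normalizeA b)) = _
      rw [pvRpow_norm]
    rw [h, pvCanonN_R (rotateA^[k] b), ← pvRpow_norm, ih]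

theorem rot_fold_frozen (p : List (Int × Int)) :
    ∀ (l : List Nat) (st : List (Int × Int) × Bool), st.2 = true →
      l.foldl (fun (tf : List (Int × Int) × Bool) _ =>
        if tf.2 then tf
        else if p = tf.1 then (tf.1, true)
        else (normalizeA (rotateA tf.1), false)) st = st := by
  intro l
  induction l with
  | nil => intro st _; rfl
  | cons x xs ih =>
    intro st h
    rw [List.foldl_cons]
    rw [show (if st.2 then st
        else if p = st.1 then (st.1, true)
        else (normalizeA (rotateA st.1), false)) = st from by rw [h]; simp]
    exact ih st h

theorem rot_fold_iff (p : List (Int × Int)) :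
    ∀ (l : List Nat) (q : List (Int × Int)),
    ((l.foldl (fun (tf : List (Int × Int) × Bool) _ =>
        if tf.2 then tf
        else if p = tf.1 then (tf.1, true)
        else (normalizeA (rotateA tf.1), false)) (q, false)).2 = true) ↔
      ∃ k, k < l.length ∧ p = pvRpow k q := by
  intro l
  induction l with
  | nil => intro q; simp
  | cons x xs ih =>
    intro q
    rw [List.foldl_cons]
    have hst : (if ((q, false) : List (Int × Int) × Bool).2 then ((q, false) : List (Int × Int) × Bool)
        else if p = (q, false).1 then ((q, false).1, true)
        else (normalizeA (rotateA (q, false).1), false)) =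
        (if p = q then (q, true) else (normalizeA (rotateA q), false)) := by
      by_cases hpq : p = q <;> simp [hpq]
    rw [hst]
    by_cases hpq : p = q
    · rw [if_pos hpq, rot_fold_frozen p xs _ rfl]
      exact iff_of_true rfl ⟨0, by simp, hpq⟩
    · rw [if_neg hpq]
      have : (normalizeA (rotateA q), false) = ((pvR q : List (Int × Int)), false) := rfl
      rw [this, ih (pvR q)]
      constructor
      · rintro ⟨k, hk, h⟩
        refine ⟨k + 1, by simp; omega, ?_⟩
        rw [h, pvRpow_succ_inner]
      · rintro ⟨k, hk, h⟩
        cases k with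
        | zero => exact absurd h hpq
        | succ k =>
          refine ⟨k, by simp at hk; omega, ?_⟩
          rw [← pvRpow_succ_inner] at h
          exact h

theorem rotTryA_iff (p t : List (Int × Int)) :
    rotTryA p t = true ↔ ∃ k, k < 4 ∧ p = pvRpow k t := by
  unfold rotTryA
  rw [rot_fold_iff p (List.range 4) t]
  simp

theorem canonN_mem (s : List (Int × Int)) : ∃ i, i ≤ 3 ∧ pvCanonN s = pvRpow i s := by
  rcases pvM_mem s (pvRpow 1 s) (pvRpow 2 s) (pvRpow 3 s) with h | h | h | h
  · exact ⟨0, by omega, h⟩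
  · exact ⟨1, by omega, h⟩
  · exact ⟨2, by omega, h⟩
  · exact ⟨3, by omega, h⟩

theorem rotTry_iff_canonical (b t : List (Int × Int)) :
    rotTryA (normalizeA b) (normalizeA t) = true ↔ canonB b = canonB t := by
  rw [rotTryA_iff, canonB_eq_canonN, canonB_eq_canonN]
  constructor
  · rintro ⟨k, _, h⟩
    exact (congrArg pvCanonN h).trans (pvCanonN_Rpow k t)
  · intro hc
    obtain ⟨i, hi, hib⟩ := canonN_mem (normalizeA b)
    obtain ⟨j, hj, hjt⟩ := canonN_mem (normalizeA t)
    have hPb : normalizeA b = pvRpow ((4 - i) + j) (normalizeA t) := by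
      have h1 : normalizeA b = pvRpow (4 - i) (pvRpow i (normalizeA b)) := by
        rw [← pvRpow_add, show (4 - i) + i = 4 by omega, pvR4]
      rw [h1, ← hib, hc, hjt, ← pvRpow_add]
    rw [pvRpow_mod] at hPb
    exact ⟨((4 - i) + j) % 4, Nat.mod_lt _ (by omega), hPb⟩

-- Phase 4: matching loop ------------------------------------------------------

def pvCountFree (used : List Bool) (T : List (List (Int × Int))) (c : List (Int × Int)) : Nat :=
  (used.zip T).countP (fun ut => !ut.1 && decide (canonB ut.2 = c))

theorem innerA_frozen (tps : List (List (Int × Int))) (p : List (Int × Int)) :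
    ∀ (l : List Nat) (st : List Bool × Int × Bool), st.2.2 = true →
      l.foldl (innerBodyA tps p) st = st := by
  intro l
  induction l with
  | nil => intro st h; rfl
  | cons x xs ih =>
    intro st h
    rw [List.foldl_cons, show innerBodyA tps p st x = st by rw [innerBodyA, if_pos (Or.inr h)], ih st h]

theorem innerA_skip (tps : List (List (Int × Int))) (p : List (Int × Int))
    (used : List Bool) (ans : Int) :
    ∀ n : Nat, (∀ i < n, used.getD i false = true ∨ rotTryA p (tps.getD i []) = false) →
      (List.range n).foldl (innerBodyA tps p) (used, ans, false) = (used, ans, false) := by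
  intro n
  induction n with
  | zero => intro _; rfl
  | succ n ih =>
    intro h
    rw [List.range_succ, List.foldl_append, ih (fun i hi => h i (by omega)), List.foldl_cons,
      List.foldl_nil]
    rcases h n (by omega) with hu | hr
    · rw [innerBodyA, if_pos (Or.inl hu)]
    · rw [innerBodyA]
      by_cases hu : (used, ans, false).1.getD n false = true ∨ ((used : List Bool), ans, false).2.2 = true
      · rw [if_pos hu]
      · rw [if_neg hu, if_neg (by rw [show (tps.getD n []) = (tps.getD n []) from rfl]; intro habs; rw [hr] at habs; exact absurd habs (by simp))]

theorem innerA_none (tps : List (List (Int × Int))) (p : List (Int × Int))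
    (used : List Bool) (ans : Int)
    (h : ∀ i < tps.length, used.getD i false = false → rotTryA p (tps.getD i []) = false) :
    innerA tps p (used, ans) = (used, ans) := by
  unfold innerA
  rw [innerA_skip tps p used ans tps.length ?_]
  intro i hi
  by_cases hu : used.getD i false = true
  · exact Or.inl hu
  · exact Or.inr (h i hi (by simpa using hu))

theorem innerA_found (tps : List (List (Int × Int))) (p : List (Int × Int))
    (used : List Bool) (ans : Int) (i0 : Nat) (hi0 : i0 < tps.length)
    (hfree : used.getD i0 false = false) (hmatch : rotTryA p (tps.getD i0 []) = true)
    (hfirst : ∀ i < i0, used.getD i false = true ∨ rotTryA p (tps.getD i []) = false) :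
    innerA tps p (used, ans) = (used.set i0 true, ans + p.length) := by
  unfold innerA
  obtain ⟨m, hm⟩ : ∃ m, tps.length = (i0 + 1) + m := ⟨tps.length - (i0 + 1), by omega⟩
  rw [hm, List.range_add, List.foldl_append, List.range_succ, List.foldl_append,
    innerA_skip tps p used ans i0 hfirst, List.foldl_cons, List.foldl_nil]
  have hbody : innerBodyA tps p (used, ans, false) i0 = (used.set i0 true, ans + p.length, true) := by
    rw [innerBodyA, if_neg ?hng, if_pos hmatch]
    case hng =>
      rintro (h | h)
      · rw [show ((used : List Bool), ans, false).1 = used from rfl] at h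
        rw [hfree] at h
        exact absurd h (by simp)
      · exact absurd h (by simp)
  rw [hbody, innerA_frozen tps p _ _ rfl]

theorem getD_map_norm (T : List (List (Int × Int))) (i : Nat) (hi : i < T.length) :
    (T.map normalizeA).getD i [] = normalizeA (T.getD i []) := by
  rw [List.getD_eq_getElem _ _ (by simpa using hi), List.getD_eq_getElem _ _ hi]
  simp

theorem countFree_pos_iff (used : List Bool) (T : List (List (Int × Int)))
    (c : List (Int × Int)) (hlen : used.length = T.length) :
    0 < pvCountFree used T c ↔
      ∃ i, i < T.length ∧ used.getD i false = false ∧ canonB (T.getD i []) = c := by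
  unfold pvCountFree
  rw [List.countP_pos_iff]
  constructor
  · rintro ⟨⟨u, t⟩, hmem, hp⟩
    rw [List.mem_iff_getElem] at hmem
    obtain ⟨i, hilt, hget⟩ := hmem
    have hizip : i < T.length := by
      rw [List.length_zip, hlen] at hilt; omega
    rw [List.getElem_zip] at hget
    injection hget with h1 h2
    simp only [Bool.and_eq_true, Bool.not_eq_true', decide_eq_true_eq] at hp
    refine ⟨i, hizip, ?_, ?_⟩
    · rw [List.getD_eq_getElem _ _ (by omega), h1]; exact hp.1
    · rw [List.getD_eq_getElem _ _ hizip, h2]; exact hp.2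
  · rintro ⟨i, hi, hu, hcan⟩
    refine ⟨(used[i], T[i]), ?_, ?_⟩
    · rw [List.mem_iff_getElem]
      exact ⟨i, by rw [List.length_zip, hlen]; omega, by rw [List.getElem_zip]⟩
    · rw [List.getD_eq_getElem _ _ (by omega)] at hu
      rw [List.getD_eq_getElem _ _ hi] at hcan
      simp [hu, hcan]

theorem countFree_set (used : List Bool) (T : List (List (Int × Int)))
    (i0 : Nat) (c : List (Int × Int)) :
    ∀ (hi0 : i0 < T.length) (hlen : used.length = T.length)
      (hfree : used.getD i0 false = false),
    pvCountFree used T c =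
      pvCountFree (used.set i0 true) T c + (if canonB (T.getD i0 []) = c then 1 else 0) := by
  induction used generalizing T i0 with
  | nil => intro hi0 hlen _; rw [← hlen] at hi0; simp at hi0
  | cons u us ih =>
    intro hi0 hlen hfree
    cases T with
    | nil => simp at hi0
    | cons t ts =>
      cases i0 with
      | zero =>
        have hu : u = false := hfree
        subst hu
        simp only [List.set_cons_zero, List.getD_cons_zero]
        unfold pvCountFree
        simp only [List.zip_cons_cons, List.countP_cons]
        by_cases hc : canonB t = c <;> simp [hc]
      | succ i =>
        unfold pvCountFree
        simp only [List.set_cons_succ, List.zip_cons_cons, List.countP_cons, List.getD_cons_succ]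
        have := ih ts i (by simpa using hi0) (by simpa using hlen) (by simpa using hfree)
        unfold pvCountFree at this
        omega

theorem countFree_init (T : List (List (Int × Int))) (c : List (Int × Int)) :
    pvCountFree (List.replicate T.length false) T c = List.count c (T.map canonB) := by
  induction T with
  | nil => rfl
  | cons t ts ih =>
    unfold pvCountFree
    simp only [List.length_cons, List.replicate_succ, List.zip_cons_cons, List.countP_cons,
      List.map_cons, List.count_cons]
    unfold pvCountFree at ih
    rw [ih]
    by_cases hc : canonB t = c
    · simp [hc]
    · simp [hc]

-- the matching step: one board piece against the (used-pieces, counts) states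
theorem match_step (T : List (List (Int × Int))) (blk : List (Int × Int))
    (used : List Bool) (ans : Int) (counts : PySem.Dict (List (Int × Int)) Int) (ansB : Int)
    (hans : ans = ansB) (hlen : used.length = T.length)
    (hcnt : ∀ c, counts.getD c 0 = (pvCountFree used T c : Int)) :
    (innerA (T.map normalizeA) (normalizeA blk) (used, ans)).2 =
      (if counts.getD (canonB blk) 0 > 0
        then (counts.insert (canonB blk) (counts.getD (canonB blk) 0 - 1),
          ansB + (blk.length : Int))
        else (counts, ansB)).2 ∧
    (innerA (T.map normalizeA) (normalizeA blk) (used, ans)).1.length = T.length ∧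
    ∀ c, (if counts.getD (canonB blk) 0 > 0
        then (counts.insert (canonB blk) (counts.getD (canonB blk) 0 - 1),
          ansB + (blk.length : Int))
        else (counts, ansB)).1.getD c 0 =
      (pvCountFree (innerA (T.map normalizeA) (normalizeA blk) (used, ans)).1 T c : Int) := by
  by_cases hpos : counts.getD (canonB blk) 0 > 0
  · -- a free matching table piece exists; A takes the first one
    have hex : ∃ i, i < T.length ∧ used.getD i false = false ∧
        canonB (T.getD i []) = canonB blk := by
      rw [← countFree_pos_iff used T (canonB blk) hlen]
      have := hcnt (canonB blk)
      omega
    classical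
    let P := fun i => i < T.length ∧ used.getD i false = false ∧
        canonB (T.getD i []) = canonB blk
    have hP : ∃ i, P i := hex
    obtain ⟨hi0T, hi0free, hi0can⟩ : P (Nat.find hP) := Nat.find_spec hP
    have hfound : innerA (T.map normalizeA) (normalizeA blk) (used, ans) =
        (used.set (Nat.find hP) true, ans + (normalizeA blk).length) := by
      apply innerA_found
      · simpa using hi0T
      · exact hi0free
      · rw [getD_map_norm T (Nat.find hP) hi0T, rotTry_iff_canonical]
        exact hi0can.symm
      · intro i hi
        by_cases hu : used.getD i false = true
        · exact Or.inl hu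
        · refine Or.inr ?_
          have hnP : ¬ P i := Nat.find_min hP hi
          have hiT : i < T.length := by omega
          rw [getD_map_norm T i hiT]
          rw [Bool.eq_false_iff]
          intro habs
          rw [rotTry_iff_canonical] at habs
          exact hnP ⟨hiT, by simpa using hu, habs.symm⟩
    rw [hfound, if_pos hpos]
    refine ⟨?_, ?_, ?_⟩
    · simp [hans, normalizeA_length]
    · simp [hlen]
    · intro c
      show (counts.insert (canonB blk) (counts.getD (canonB blk) 0 - 1)).getD c 0 =
        (pvCountFree (used.set (Nat.find hP) true) T c : Int)
      rw [PySem.Dict.getD_insert]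
      have hset := countFree_set used T (Nat.find hP) c hi0T hlen hi0free
      rw [hi0can] at hset
      by_cases hc : c = canonB blk
      · rw [if_pos hc, hc]
        rw [hc, if_pos rfl] at hset
        have h1 := hcnt (canonB blk)
        omega
      · rw [if_neg hc]
        rw [if_neg (fun h => hc h.symm)] at hset
        have h1 := hcnt c
        omega
  · -- no free matching piece: both sides unchanged
    have hnone : innerA (T.map normalizeA) (normalizeA blk) (used, ans) = (used, ans) := by
      apply innerA_none
      intro i hi hfree
      have hiT : i < T.length := by simpa using hi
      rw [getD_map_norm T i hiT, Bool.eq_false_iff]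
      intro habs
      rw [rotTry_iff_canonical] at habs
      have hcf : 0 < pvCountFree used T (canonB blk) := by
        rw [countFree_pos_iff used T _ hlen]
        exact ⟨i, hiT, hfree, habs.symm⟩
      have := hcnt (canonB blk)
      omega
    rw [hnone, if_neg hpos]
    exact ⟨hans, hlen, hcnt⟩

-- the matching phases agree
theorem match_phase (T BL : List (List (Int × Int))) :
    ((BL.map normalizeA).foldl (fun ua p => innerA (T.map normalizeA) p ua)
        (List.replicate (T.map normalizeA).length false, 0)).2 =
      (BL.foldl
        (fun (ca : PySem.Dict (List (Int × Int)) Int × Int) p =>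
          let key := canonB p
          if ca.1.getD key 0 > 0 then (ca.1.insert key (ca.1.getD key 0 - 1), ca.2 + (p.length : Int))
          else ca)
        (PySem.Dict.counter (T.map canonB), 0)).2 := by
  rw [List.foldl_map]
  refine (pvFoldRel
    (R := fun (ua : List Bool × Int) (ca : PySem.Dict (List (Int × Int)) Int × Int) =>
      ua.2 = ca.2 ∧ ua.1.length = T.length ∧
      ∀ c, ca.1.getD c 0 = (pvCountFree ua.1 T c : Int))
    (f := fun ua blk => innerA (T.map normalizeA) (normalizeA blk) ua)
    (g := fun ca blk =>
      let key := canonB blk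
      if ca.1.getD key 0 > 0 then (ca.1.insert key (ca.1.getD key 0 - 1), ca.2 + (blk.length : Int))
      else ca)
    _ (List.replicate (T.map normalizeA).length false, 0)
    (PySem.Dict.counter (T.map canonB), 0)
    ⟨rfl, by simp, fun c => by
      rw [PySem.Dict.getD_counter]
      show _ = (pvCountFree (List.replicate (T.map normalizeA).length false) T c : Int)
      rw [List.length_map, countFree_init]⟩
    ?_).1
  intro blk a b hab
  obtain ⟨used, ans⟩ := a
  obtain ⟨counts, ansB⟩ := b
  exact match_step T blk used ans counts ansB hab.1 hab.2.1 hab.2.2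

-- ===== VERDICT (by name: the statement is the Claim_ definition above) =====
theorem solution_spec : Claim_equal_solution := by
  intro gb tb _hdom _hpre
  show solution gb tb = solution_alt gb tb
  simp only [solution, solution_alt]
  rw [(scanA_eq_componentsB gb 0 gb.length).1, (scanA_eq_componentsB tb 1 gb.length).1]
  exact match_phase (componentsB tb 1 gb.length).1 (componentsB gb 0 gb.length).1
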